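-- pv_equiv track=rewrite | github.com/equinor/semeio | semeio/workflows/ahm_analysis/ahmanalysis.py | make_obs_groups
-- ===== SOURCE A (Python) =====
-- import itertools
--
-- def make_obs_groups(key_map):
--     """Create a mapping of observation groups, the names will be:
--     data_key -> [obs_keys] and All_obs-{missing_obs} -> [obs_keys]
--     and All_obs -> [all_obs_keys]
--     """
--     combinations = key_map.copy()
--     if len(combinations) == 1:
--         return combinations
--
--     combinations["All_obs"] = list(itertools.chain.from_iterable(key_map.values()))
--
--     if len(combinations) == 3:
--         return combinations
--
--     for subset in itertools.combinations(key_map.keys(), len(key_map.keys()) - 1):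
--         obs_group = list(
--             itertools.chain.from_iterable([key_map[key] for key in subset])
--         )
--         missing_obs = [x for x in key_map.keys() if x not in set(subset)]
--         assert len(missing_obs) == 1
--         name = f"All_obs-{missing_obs[0]}"
--         combinations[name.replace(":", "_")] = obs_group
--
--     return combinations
-- ===== SOURCE B (Python) =====
-- def make_obs_groups(key_map):
--     """Create a mapping of observation groups, the names will be:
--     data_key -> [obs_keys] and All_obs-{missing_obs} -> [obs_keys]
--     and All_obs -> [all_obs_keys]
--     """
--     combinations = key_map.copy()
--     if len(combinations) == 1:
--         return combinations
--
--     all_obs = []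
--     segments = []
--     for key, values in key_map.items():
--         start = len(all_obs)
--         all_obs = all_obs + values
--         segments.append((key, start, len(all_obs)))
--
--     combinations["All_obs"] = all_obs
--
--     if len(combinations) == 3:
--         return combinations
--
--     for key, start, end in reversed(segments):
--         name = f"All_obs-{key}"
--         combinations[name.replace(":", "_")] = all_obs[:start] + all_obs[end:]
--
--     return combinations
-- ===== Notes on version B (the rewrite author's own statement) =====
-- stated objective: alternative
-- what changed: Replaces the itertools.combinations over (n-1)-subsets (re-concatenating the kept groups and recomputing the missing key by a set-membership filter for every subset) with one pass that builds the combined All_obs list while recording each key's contiguous (start,end) segment, and then forms every leave-one-out group by slicing around its segment: all_obs[:start] + all_obs[end:].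
import Mathlib
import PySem

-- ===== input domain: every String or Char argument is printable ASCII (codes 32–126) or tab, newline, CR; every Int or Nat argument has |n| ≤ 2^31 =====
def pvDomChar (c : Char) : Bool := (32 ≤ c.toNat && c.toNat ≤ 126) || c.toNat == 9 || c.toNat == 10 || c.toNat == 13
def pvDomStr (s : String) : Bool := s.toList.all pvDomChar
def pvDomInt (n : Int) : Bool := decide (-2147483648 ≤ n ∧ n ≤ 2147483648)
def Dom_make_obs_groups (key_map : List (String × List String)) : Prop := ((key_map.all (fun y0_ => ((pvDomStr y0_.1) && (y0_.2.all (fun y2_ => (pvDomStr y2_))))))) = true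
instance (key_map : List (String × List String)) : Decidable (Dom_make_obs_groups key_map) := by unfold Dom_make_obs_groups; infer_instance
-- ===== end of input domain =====

-- Header: B builds All_obs once while recording each key's (start,end) segment and forms every
-- leave-one-out group by slicing around that segment, instead of A's itertools.combinations over
-- (n-1)-subsets; equal insertion order and values on all non-empty dicts (alternative decomposition).

-- ===== PORT A =====

-- Python dict assignment d[k] = v: overwrite in place if the key exists, else append.
def dinsert (d : List (String × List String)) (k : String) (v : List String) :
    List (String × List String) :=
  if d.any (fun p => p.1 == k) then d.map (fun p => if p.1 == k then (k, v) else p)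
  else d ++ [(k, v)]

-- Python dict lookup key_map[key]; total stand-in returning [] where Python would raise KeyError
-- (never reached: A only looks up keys taken from key_map.keys()).
def dlook (d : List (String × List String)) (k : String) : List String :=
  match d with
  | [] => []
  | (k', v) :: r => if k' == k then v else dlook r k

-- itertools.combinations(l, k): all k-subsets, lexicographic in the positions of l.
def pyCombos {α : Type} (l : List α) (k : Nat) : List (List α) :=
  match l, k with
  | _, 0 => [[]]
  | [], _ + 1 => []
  | x :: xs, k + 1 => (pyCombos xs k).map (x :: ·) ++ pyCombos xs (k + 1)

def make_obs_groups (key_map : List (String × List String)) : List (String × List String) :=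
  let combinations := key_map
  if combinations.length == 1 then combinations
  else
    let combinations := dinsert combinations "All_obs" ((key_map.map (·.2)).flatten)
    if combinations.length == 3 then combinations
    else
      (pyCombos (key_map.map (·.1)) ((key_map.map (·.1)).length - 1)).foldl
        (fun comb subset =>
          let obs_group := (subset.map (fun key => dlook key_map key)).flatten
          let missing_obs := (key_map.map (·.1)).filter (fun x => !subset.contains x)
          -- assert len(missing_obs) == 1 holds under Pre_; missing_obs[0] ported as headD
          let name := "All_obs-" ++ missing_obs.headD ""
          dinsert comb (PySem.Str.replace name ":" "_") obs_group)
        combinations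

-- ===== PORT B =====

def make_obs_groups_alt (key_map : List (String × List String)) : List (String × List String) :=
  let combinations := key_map
  if combinations.length == 1 then combinations
  else
    -- one pass: all_obs grows, segments records (key, start, end)
    let st := key_map.foldl
      (fun (acc : List String × List (String × Nat × Nat)) kv =>
        let start := acc.1.length
        let all := acc.1 ++ kv.2
        (all, acc.2 ++ [(kv.1, start, all.length)]))
      ([], [])
    let all_obs := st.1
    let segments := st.2
    let combinations := dinsert combinations "All_obs" all_obs
    if combinations.length == 3 then combinations
    else
      segments.reverse.foldl
        (fun comb seg =>
          let name := "All_obs-" ++ seg.1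
          dinsert comb (PySem.Str.replace name ":" "_")
            (PySem.List.slice all_obs none (some (seg.2.1 : Int)) ++
             PySem.List.slice all_obs (some (seg.2.2 : Int)) none))
        combinations

-- ===== PRECONDITION & SPEC =====

-- A's argument is a Python dict, so its keys are necessarily distinct: a duplicate-key list
-- represents no dict input (and makes A's `assert len(missing_obs) == 1` raise on many shapes);
-- on the empty dict A raises ValueError from itertools.combinations(keys, -1).
def Pre_make_obs_groups (key_map : List (String × List String)) : Prop :=
  (key_map.map (·.1)).Nodup ∧ key_map ≠ []
instance (key_map : List (String × List String)) : Decidable (Pre_make_obs_groups key_map) := by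
  unfold Pre_make_obs_groups; infer_instance

def pvWitness_make_obs_groups : (List (String × List String)) :=
  [("a:1", ["x", "y"]), ("b", ["z"]), ("c", [])]

def Spec_make_obs_groups (key_map : List (String × List String)) (out : List (String × List String)) : Prop := out = make_obs_groups_alt key_map
instance (key_map : List (String × List String)) (out : List (String × List String)) : Decidable (Spec_make_obs_groups key_map out) := by unfold Spec_make_obs_groups; infer_instance

-- ===== CLAIM (what is proved, stated in full; the proofs are below) =====
def Claim_equal_make_obs_groups : Prop := ∀ (key_map : List (String × List String)), Dom_make_obs_groups key_map → Pre_make_obs_groups key_map → Spec_make_obs_groups key_map (make_obs_groups key_map)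
-- ===== LEMMAS AND PROOFS =====

-- leave-one-out subsets of l in the order itertools.combinations(l, len(l)-1) yields them
-- (the missing element runs back-to-front)
def looMinus {α : Type} : List α → List (List α)
  | [] => []
  | x :: xs => (looMinus xs).map (x :: ·) ++ [xs]

-- spec of B's segment table, as a running-offset recursion
def segSpec : List (String × List String) → Nat → List (String × Nat × Nat)
  | [], _ => []
  | (k, v) :: r, o => (k, o, o + v.length) :: segSpec r (o + v.length)

theorem pyCombos_big {α : Type} (l : List α) (k : Nat) (h : l.length < k) :
    pyCombos l k = [] := by
  induction l generalizing k with
  | nil => cases k with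
    | zero => omega
    | succ k => rfl
  | cons x xs ih =>
    cases k with
    | zero => omega
    | succ k =>
      simp only [pyCombos]
      rw [ih k (by simp at h ⊢; omega), ih (k + 1) (by simp at h ⊢; omega)]
      simp

theorem pyCombos_full {α : Type} (l : List α) : pyCombos l l.length = [l] := by
  induction l with
  | nil => rfl
  | cons x xs ih =>
    simp only [List.length_cons, pyCombos, ih, pyCombos_big xs (xs.length + 1) (by omega)]
    simp

theorem pyCombos_pred {α : Type} (l : List α) (h : l ≠ []) :
    pyCombos l (l.length - 1) = looMinus l := by
  induction l with
  | nil => exact absurd rfl h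
  | cons x xs ih =>
    cases xs with
    | nil => rfl
    | cons y ys =>
      have hlen : (x :: y :: ys).length - 1 = (y :: ys).length := rfl
      rw [hlen]
      show (pyCombos (y :: ys) ((y :: ys).length - 1)).map (x :: ·) ++
          pyCombos (y :: ys) (y :: ys).length = _
      rw [ih (by simp), pyCombos_full]
      rfl

theorem looMinus_subset {α : Type} (l : List α) (sub : List α) (hs : sub ∈ looMinus l) :
    ∀ x ∈ sub, x ∈ l := by
  induction l generalizing sub with
  | nil => simp [looMinus] at hs
  | cons a r ih =>
    simp only [looMinus, List.mem_append, List.mem_map, List.mem_singleton] at hs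
    rcases hs with ⟨s', hs', rfl⟩ | rfl
    · intro x hx
      rcases hx with _ | hx
      · simp
      · exact List.mem_cons_of_mem a (ih s' hs' x (by assumption))
    · intro x hx; exact List.mem_cons_of_mem a hx

theorem bfold (l : List (String × List String)) (a0 : List String)
    (s0 : List (String × Nat × Nat)) :
    l.foldl
      (fun (acc : List String × List (String × Nat × Nat)) kv =>
        let start := acc.1.length
        let all := acc.1 ++ kv.2
        (all, acc.2 ++ [(kv.1, start, all.length)]))
      (a0, s0)
    = (a0 ++ (l.map (·.2)).flatten, s0 ++ segSpec l a0.length) := by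
  induction l generalizing a0 s0 with
  | nil => simp [segSpec]
  | cons p r ih =>
    obtain ⟨k, v⟩ := p
    simp only [List.foldl_cons, ih, segSpec, List.map_cons, List.flatten_cons]
    simp

theorem dlook_mem (r : List (String × List String)) (hnd : (r.map (·.1)).Nodup)
    (p : String × List String) (hp : p ∈ r) : dlook r p.1 = p.2 := by
  induction r with
  | nil => simp at hp
  | cons q t ih =>
    obtain ⟨qk, qv⟩ := q
    simp only [List.map_cons, List.nodup_cons] at hnd
    rcases List.mem_cons.mp hp with h | hp'
    · rw [h]; simp [dlook]
    · have hne : qk ≠ p.1 := fun hh => hnd.1 (hh ▸ List.mem_map_of_mem hp')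
      simp only [dlook]
      rw [if_neg (by simpa using hne)]
      exact ih hnd.2 hp'

-- the heart: A's subset pair list equals B's reversed segment pair list
theorem main_pairs (rest : List (String × List String)) (hnd : (rest.map (·.1)).Nodup)
    (pre : List String) :
    (looMinus (rest.map (·.1))).map
      (fun sub =>
        (PySem.Str.replace
          ("All_obs-" ++ ((rest.map (·.1)).filter (fun x => !sub.contains x)).headD "") ":" "_",
          pre ++ (sub.map (fun key => dlook rest key)).flatten))
    = (segSpec rest pre.length).reverse.map
      (fun seg =>
        (PySem.Str.replace ("All_obs-" ++ seg.1) ":" "_",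
          (pre ++ (rest.map (·.2)).flatten).take seg.2.1 ++
          (pre ++ (rest.map (·.2)).flatten).drop seg.2.2)) := by
  induction rest generalizing pre with
  | nil => rfl
  | cons p r ih =>
    obtain ⟨k, v⟩ := p
    simp only [List.map_cons, List.nodup_cons] at hnd
    obtain ⟨hk, hndr⟩ := hnd
    simp only [List.map_cons, looMinus, List.map_append, List.map_map, segSpec,
      List.reverse_cons, List.map_nil]
    have hbase : pre ++ v ++ (List.map (fun x => x.2) r).flatten
        = pre ++ (v :: List.map (fun x => x.2) r).flatten := by simp
    have hmap :
        (looMinus (r.map (·.1))).map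
          ((fun sub =>
            (PySem.Str.replace
              ("All_obs-" ++ ((k :: r.map (·.1)).filter (fun x => !sub.contains x)).headD "") ":" "_",
              pre ++ (sub.map (fun key => dlook ((k, v) :: r) key)).flatten)) ∘ (k :: ·))
        = (looMinus (r.map (·.1))).map
          (fun sub =>
            (PySem.Str.replace
              ("All_obs-" ++ ((r.map (·.1)).filter (fun x => !sub.contains x)).headD "") ":" "_",
              (pre ++ v) ++ (sub.map (fun key => dlook r key)).flatten)) := by
      apply List.map_congr_left
      intro sub hsub
      have hsubmem := looMinus_subset _ sub hsub
      have hfil : List.filter (fun x => !(k :: sub).contains x) (k :: List.map (fun x => x.1) r)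
          = List.filter (fun x => !sub.contains x) (List.map (fun x => x.1) r) := by
        rw [List.filter_cons, if_neg (by simp)]
        apply List.filter_congr
        intro x hx
        have hxk : (k == x) = false :=
          beq_eq_false_iff_ne.mpr (fun hh => hk (hh ▸ hx))
        simp
        exact fun _ hh => by simp [hh] at hxk
      simp only [Function.comp_apply]
      congr 1
      · rw [hfil]
      · have h1 : dlook ((k, v) :: r) k = v := by simp [dlook]
        have h2 : sub.map (fun key => dlook ((k, v) :: r) key)
            = sub.map (fun key => dlook r key) := by
          apply List.map_congr_left
          intro key hkey
          have : k ≠ key := fun hh => hk (hh ▸ hsubmem key hkey)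
          simp [dlook, this]
        simp only [List.map_cons, List.flatten_cons, h1, h2, List.append_assoc]
    rw [hmap, ih hndr (pre ++ v)]
    congr 1
    · rw [show (pre ++ v).length = pre.length + v.length by simp]
      apply List.map_congr_left
      intro seg _
      rw [hbase]
    · have hfil2 : List.filter (fun x => !(List.map (fun x => x.1) r).contains x)
          (k :: List.map (fun x => x.1) r) = [k] := by
        have hrest : List.filter (fun x => !(List.map (fun x => x.1) r).contains x)
            (List.map (fun x => x.1) r) = [] := by
          apply List.filter_eq_nil_iff.mpr
          intro x hx
          simpa using hx
        rw [List.filter_cons, if_pos (by simpa using hk), hrest]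
      congr 1
      congr 1
      · rw [hfil2]; rfl
      · have h2 : List.map ((fun key => dlook ((k, v) :: r) key) ∘ fun x => x.1) r
            = List.map (fun x => x.2) r := by
          apply List.map_congr_left
          intro x hx
          have hxk : k ≠ x.1 := fun hh => hk (hh ▸ List.mem_map_of_mem hx)
          have hstep : dlook ((k, v) :: r) x.1 = dlook r x.1 := by simp [dlook, hxk]
          simp only [Function.comp_apply, hstep]
          exact dlook_mem r hndr x hx
        rw [h2, ← hbase]
        have ht : ((pre ++ v) ++ (r.map (·.2)).flatten).take pre.length = pre := by
          rw [List.append_assoc, List.take_append_of_le_length (by simp), List.take_length]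
        have hd : ((pre ++ v) ++ (r.map (·.2)).flatten).drop (pre.length + v.length) =
            (r.map (·.2)).flatten := by
          rw [show pre.length + v.length = (pre ++ v).length by simp, List.drop_left]
        rw [ht, hd]

-- rewrite a fold that inserts computed pairs as a fold over the pair list
theorem fold_as_pairs {β : Type} (L : List β) (init : List (String × List String))
    (nm : β → String) (gr : β → List String) :
    L.foldl (fun comb x => dinsert comb (nm x) (gr x)) init
    = (L.map (fun x => (nm x, gr x))).foldl (fun comb p => dinsert comb p.1 p.2) init := by
  rw [List.foldl_map]

-- ===== VERDICT (by name: the statement is the Claim_ definition above) =====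
theorem make_obs_groups_spec : Claim_equal_make_obs_groups := by
  intro key_map _ hpre
  obtain ⟨hnd, hne⟩ := hpre
  unfold Spec_make_obs_groups make_obs_groups make_obs_groups_alt
  simp only
  by_cases h1 : key_map.length == 1
  · simp [h1]
  · simp only [h1, if_false, Bool.false_eq_true]
    rw [bfold]
    simp only [List.nil_append, List.length_nil]
    by_cases h3 : (dinsert key_map "All_obs" ((key_map.map (·.2)).flatten)).length == 3
    · simp [h3]
    · simp only [h3, if_false, Bool.false_eq_true]
      rw [pyCombos_pred (key_map.map (·.1)) (by simpa using hne)]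
      rw [fold_as_pairs (looMinus (key_map.map (·.1))),
          fold_as_pairs ((segSpec key_map 0).reverse)]
      have hmain := main_pairs key_map hnd []
      simp only [List.nil_append, List.length_nil] at hmain
      rw [hmain]
      congr 1
      apply List.map_congr_left
      intro seg _
      congr 1
      rw [PySem.List.slice_to_natCast, PySem.List.slice_from_natCast]
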